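-- pv_equiv track=rewrite | github.com/briantoanle/CodeSignalPrep | ZigZag.py | solution
-- ===== SOURCE A (Python) =====
-- def solution(numbers):
--     # 1 2 3 4 5
--     newArr = []
--     for i in range(len(numbers)-2):
--         if numbers[i] < numbers[i+1] and numbers[i+1] > numbers[i+2]:
--             newArr.append(1)
--
--         elif numbers[i] > numbers[i+1] and numbers[i+1] < numbers[i+2]:
--             newArr.append(1)
--         else:
--             newArr.append(0)
--     return newArr
-- ===== SOURCE B (Python) =====
-- def solution(numbers):
--     diffs = [b - a for a, b in zip(numbers, numbers[1:])]
--     return [1 if x * y < 0 else 0 for x, y in zip(diffs, diffs[1:])]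
-- ===== Notes on version B (the rewrite author's own statement) =====
-- stated objective: alternative
-- what changed: Two-stage pipeline: first compute the list of consecutive differences, then mark each adjacent pair of differences with 1 when their product is strictly negative, replacing A's index loop with a triple-comparison branch chain.
import Mathlib
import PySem

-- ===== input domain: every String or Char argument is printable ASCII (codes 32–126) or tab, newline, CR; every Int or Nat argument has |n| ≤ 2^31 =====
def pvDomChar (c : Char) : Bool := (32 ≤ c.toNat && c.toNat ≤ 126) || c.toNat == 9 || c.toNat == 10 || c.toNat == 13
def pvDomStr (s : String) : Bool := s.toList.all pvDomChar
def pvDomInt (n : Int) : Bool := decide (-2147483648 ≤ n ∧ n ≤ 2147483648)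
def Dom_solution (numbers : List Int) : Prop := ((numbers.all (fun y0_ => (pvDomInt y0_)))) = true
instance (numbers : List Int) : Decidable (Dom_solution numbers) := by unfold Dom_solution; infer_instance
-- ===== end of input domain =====

-- B rebuilds the same 0/1 zigzag marks as a two-stage pipeline (consecutive differences, then sign-product test); alternative decomposition, same cost.
-- ===== PORT A =====
def solution (numbers : List Int) : List Int :=
  (List.range (numbers.length - 2)).foldl (fun newArr i =>
    if numbers.getD i 0 < numbers.getD (i+1) 0 ∧ numbers.getD (i+1) 0 > numbers.getD (i+2) 0 then
      newArr ++ [1]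
    else if numbers.getD i 0 > numbers.getD (i+1) 0 ∧ numbers.getD (i+1) 0 < numbers.getD (i+2) 0 then
      newArr ++ [1]
    else
      newArr ++ [0]) []

-- ===== PORT B =====
def solution_alt (numbers : List Int) : List Int :=
  let diffs := List.zipWith (fun a b => b - a) numbers numbers.tail
  List.zipWith (fun x y => if x * y < 0 then (1 : Int) else 0) diffs diffs.tail

-- ===== PRECONDITION & SPEC =====
def Spec_solution (numbers : List Int) (out : List Int) : Prop := out = solution_alt numbers
instance (numbers : List Int) (out : List Int) : Decidable (Spec_solution numbers out) := by unfold Spec_solution; infer_instance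

-- ===== CLAIM (what is proved, stated in full; the proofs are below) =====
def Claim_equal_solution : Prop := ∀ (numbers : List Int), Dom_solution numbers → Spec_solution numbers (solution numbers)

-- ===== LEMMAS AND PROOFS =====

theorem foldl_append_map {α β : Type} (g : α → β) :
    ∀ (l : List α) (acc : List β),
      l.foldl (fun acc i => acc ++ [g i]) acc = acc ++ l.map g := by
  intro l
  induction l with
  | nil => intro acc; simp
  | cons x xs ih => intro acc; simp [List.foldl, ih, List.append_assoc]


-- ===== VERDICT (by name: the statement is the Claim_ definition above) =====
theorem solution_spec : Claim_equal_solution := by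
  intro numbers _
  unfold Spec_solution solution solution_alt
  have hfold := foldl_append_map
    (fun i => if numbers.getD i 0 < numbers.getD (i+1) 0 ∧ numbers.getD (i+1) 0 > numbers.getD (i+2) 0 then (1:Int)
              else if numbers.getD i 0 > numbers.getD (i+1) 0 ∧ numbers.getD (i+1) 0 < numbers.getD (i+2) 0 then 1
              else 0)
    (List.range (numbers.length - 2)) []
  simp only [List.nil_append] at hfold
  have hbody : (fun (newArr : List Int) (i : Nat) =>
      if numbers.getD i 0 < numbers.getD (i+1) 0 ∧ numbers.getD (i+1) 0 > numbers.getD (i+2) 0 then newArr ++ [1]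
      else if numbers.getD i 0 > numbers.getD (i+1) 0 ∧ numbers.getD (i+1) 0 < numbers.getD (i+2) 0 then newArr ++ [1]
      else newArr ++ [0]) =
      (fun acc i => acc ++
        [if numbers.getD i 0 < numbers.getD (i+1) 0 ∧ numbers.getD (i+1) 0 > numbers.getD (i+2) 0 then (1:Int)
         else if numbers.getD i 0 > numbers.getD (i+1) 0 ∧ numbers.getD (i+1) 0 < numbers.getD (i+2) 0 then 1
         else 0]) := by
    funext acc i; split_ifs <;> rfl
  rw [hbody, hfold]
  apply List.ext_getElem
  · simp [List.length_zipWith, List.length_tail]; omega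
  · intro i h1 h2
    simp only [List.getElem_map, List.getElem_range, List.getElem_zipWith, List.getElem_tail]
    clear hfold hbody
    have hi1 : i + 1 < numbers.length := by
      have := h1; simp at this; omega
    have hi2 : i + 1 + 1 < numbers.length := by
      have := h1; simp at this; omega
    have h0 : i < numbers.length := by omega
    rw [List.getD_eq_getElem _ _ h0, List.getD_eq_getElem _ _ hi1,
        List.getD_eq_getElem _ _ (show i + 2 < numbers.length by omega)]
    by_cases hP : (numbers[i+1] - numbers[i]) * (numbers[i+1+1] - numbers[i+1]) < 0
    · rw [if_pos hP]
      rw [mul_neg_iff] at hP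
      have : numbers[i+1+1] = numbers[i+2] := rfl
      split_ifs with hA hB <;> first | rfl | (exfalso; rcases hP with ⟨u,v⟩|⟨u,v⟩ <;> rw [this] at * <;> omega)
    · rw [if_neg hP]
      have : numbers[i+1+1] = numbers[i+2] := rfl
      split_ifs with hA hB <;> first
        | rfl
        | (exfalso; apply hP; rw [mul_neg_iff, this]; first
            | (left; constructor <;> omega)
            | (right; constructor <;> omega))
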